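-- pv_equiv track=rewrite | github.com/jikyoung/CodingTest_Prac | 프로그래머스/0/181921. 배열 만들기 2/배열 만들기 2.py | generate_valid_numbers
-- ===== SOURCE A (Python) =====
-- from collections import deque
--
-- def generate_valid_numbers(l, r):
--     """Generate all numbers composed of '0' and '5' within the range [l, r]."""
--     valid_numbers = set()
--     queue = deque(['5'])  # Start with the smallest valid number
--
--     # While there are numbers to process
--     while queue:
--         current = queue.popleft()
--         num = int(current)
--
--         # Check if the number is within the range
--         if l <= num <= r:
--             valid_numbers.add(num)
--
--         # Generate new numbers by appending '0' and '5'
--         if num <= r: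
--             queue.append(current + '0')
--             queue.append(current + '5')
--
--     return sorted(valid_numbers)
-- ===== SOURCE B (Python) =====
-- def generate_valid_numbers(l, r):
--     """Generate all numbers composed of '0' and '5' within the range [l, r]."""
--     def to05(m):
--         # the m-th candidate: binary digits of m with 1->5, 0->0, read in decimal
--         return 0 if m == 0 else 10 * to05(m // 2) + 5 * (m % 2)
--     res = []
--     n = 1
--     while True:
--         cand = to05(n)
--         if cand > r:
--             return res
--         if cand >= l:
--             res.append(cand)
--         n += 1
-- ===== Notes on version B (the rewrite author's own statement) =====
-- stated objective: simpler
-- what changed: Replaced the BFS over digit strings with a deque, a result set and a final sort by a single counter loop: the n-th candidate is computed arithmetically from the binary digits of n (1->5, 0->0), candidates arrive in strictly increasing order, so the in-range ones are appended to a plain list and the loop stops at the first candidate above r - no queue, no set, no sort.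
import Mathlib
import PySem

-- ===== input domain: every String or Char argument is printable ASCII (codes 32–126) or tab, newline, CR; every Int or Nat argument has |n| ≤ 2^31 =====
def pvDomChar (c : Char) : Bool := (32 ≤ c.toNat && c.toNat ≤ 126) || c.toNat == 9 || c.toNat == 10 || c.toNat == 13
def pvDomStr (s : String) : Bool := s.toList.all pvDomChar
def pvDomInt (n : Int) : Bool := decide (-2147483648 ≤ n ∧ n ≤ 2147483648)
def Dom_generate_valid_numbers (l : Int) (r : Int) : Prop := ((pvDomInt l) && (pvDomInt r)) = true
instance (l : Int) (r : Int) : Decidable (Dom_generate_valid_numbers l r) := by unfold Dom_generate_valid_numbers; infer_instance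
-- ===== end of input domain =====

-- B replaces A's BFS over digit strings (deque + set + final sort) by a counter loop that
-- produces the candidates arithmetically in strictly increasing order (objective: simpler).


-- ===== PORT A =====
-- A's BFS loop; queue entries are Python strings, kept as List Char (PySem's string carrier);
-- int(current) is PySem.Int.ofChars? (always parses here: the queue holds digit strings).
-- The fuel 4096 is only a totality guard: on the stated domain (|r| ≤ 2^31) the BFS pops
-- fewer than 4096 strings, so the guard is never hit (proved below via `cost`).
def loopA (l r : Int) : Nat → List (List Char) → PySem.Set Int → PySem.Set Int
  | 0, _, S => S
  | _+1, [], S => S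
  | f+1, current :: rest, S =>
    let num := (PySem.Int.ofChars? current).getD 0
    let S' := if l ≤ num ∧ num ≤ r then PySem.Set.add S num else S
    if num ≤ r then loopA l r f (rest ++ [current ++ ['0'], current ++ ['5']]) S'
    else loopA l r f rest S'

def generate_valid_numbers (l : Int) (r : Int) : List Int :=
  PySem.List.sorted (loopA l r 4096 [['5']] PySem.Set.empty) (fun x => x) false

-- ===== PORT B =====
-- Source B's helper to05(m) = 0 if m==0 else 10*to05(m//2) + 5*(m%2)
def to05 (m : Nat) : Int :=
  if m = 0 then 0 else 10 * to05 (m / 2) + 5 * (m % 2)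
  decreasing_by exact Nat.div_lt_self (by omega) (by omega)

-- Source B's while loop; res is the accumulator list. Fuel 4096 is only a totality guard:
-- on the stated domain the loop breaks before n reaches 1025 (proved below).
def loopB (l r : Int) : Nat → Nat → List Int → List Int
  | 0, _, res => res
  | f+1, n, res =>
    let cand := to05 n
    if r < cand then res
    else loopB l r f (n+1) (if l ≤ cand then res ++ [cand] else res)

def generate_valid_numbers_alt (l : Int) (r : Int) : List Int := loopB l r 4096 1 []

-- ===== PRECONDITION & SPEC =====
def Spec_generate_valid_numbers (l : Int) (r : Int) (out : List Int) : Prop := out = generate_valid_numbers_alt l r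
instance (l : Int) (r : Int) (out : List Int) : Decidable (Spec_generate_valid_numbers l r out) := by unfold Spec_generate_valid_numbers; infer_instance

-- ===== CLAIM (what is proved, stated in full; the proofs are below) =====
def Claim_equal_generate_valid_numbers : Prop := ∀ (l : Int) (r : Int), Dom_generate_valid_numbers l r → Spec_generate_valid_numbers l r (generate_valid_numbers l r)

-- ===== LEMMAS AND PROOFS =====

-- Fueled, kernel-reducible twins of to05 and of the string of the n-th BFS node (proof side only).
def to05F : Nat → Nat → Int
  | 0, _ => 0
  | f+1, m => if m = 0 then 0 else 10 * to05F f (m / 2) + 5 * (m % 2)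

def strOfF : Nat → Nat → List Char
  | 0, _ => []
  | f+1, n => if n = 0 then [] else strOfF f (n / 2) ++ [if n % 2 = 0 then '0' else '5']

def strOf (n : Nat) : List Char := strOfF 12 n

theorem to05F_eq : ∀ (f m : Nat), m < 2 ^ f → to05F f m = to05 m := by
  intro f
  induction f with
  | zero => intro m h; interval_cases m; rw [to05]; rfl
  | succ f ih =>
    intro m h
    rw [to05, to05F]
    by_cases h0 : m = 0
    · simp [h0]
    · simp only [h0, if_false]
      rw [ih (m / 2) (by omega)]

theorem strOfF_zero : ∀ f, strOfF f 0 = [] := by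
  intro f; cases f <;> simp [strOfF]

theorem strOfF_congr : ∀ (f g n : Nat), n < 2 ^ f → n < 2 ^ g → strOfF f n = strOfF g n := by
  intro f
  induction f with
  | zero => intro g n h _; interval_cases n; rw [strOfF_zero, strOfF_zero]
  | succ f ih =>
    intro g n h hg
    by_cases h0 : n = 0
    · rw [h0, strOfF_zero, strOfF_zero]
    · have hg0 : g ≠ 0 := by
        rcases g with _ | g
        · simp at hg; omega
        · omega
      rcases g with _ | g; · omega
      rw [strOfF, strOfF]
      simp only [h0, if_false]
      rw [ih g (n / 2) (by omega) (by
        have : 2 ^ g * 2 = 2 ^ (g+1) := by rw [pow_succ]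
        omega)]

theorem to05_zero : to05 0 = 0 := by rw [to05]; simp

theorem to05_succ {n : Nat} (h : n ≠ 0) : to05 n = 10 * to05 (n / 2) + 5 * ((n : Int) % 2) := by
  rw [to05]; simp [h]

theorem to05_even (n : Nat) : to05 (2 * n) = 10 * to05 n := by
  by_cases h : n = 0
  · simp [h, to05_zero]
  · have h2 : 2 * n / 2 = n := by omega
    have h3 : ((2 * n : Nat) : Int) % 2 = 0 := by push_cast; omega
    rw [to05_succ (by omega), h2, h3]; ring

theorem to05_odd (n : Nat) : to05 (2 * n + 1) = 10 * to05 n + 5 := by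
  have h2 : (2 * n + 1) / 2 = n := by omega
  have h3 : ((2 * n + 1 : Nat) : Int) % 2 = 1 := by push_cast; omega
  rw [to05_succ (by omega), h2, h3]; ring

theorem to05_nonneg (n : Nat) : 0 ≤ to05 n := by
  induction n using Nat.strong_induction_on with
  | _ n ih =>
    by_cases h : n = 0
    · simp [h, to05_zero]
    · have := ih (n / 2) (by omega)
      rw [to05_succ h]; omega

theorem to05_ge_five {n : Nat} (h1 : 1 ≤ n) : 5 ≤ to05 n := by
  induction n using Nat.strong_induction_on with
  | _ n ih =>
    rw [to05_succ (by omega)]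
    by_cases h2 : n / 2 = 0
    · have hn : n = 1 := by omega
      subst hn; norm_num [to05_zero]
    · have := ih (n / 2) (by omega) (by omega)
      omega

theorem to05_dvd_five (n : Nat) : (5:Int) ∣ to05 n := by
  induction n using Nat.strong_induction_on with
  | _ n ih =>
    by_cases h : n = 0
    · simp [h, to05_zero]
    · rcases ih (n / 2) (by omega) with ⟨c, hc⟩
      exact ⟨10 * c + (n : Int) % 2, by rw [to05_succ h, hc]; ring⟩

theorem to05_lt : ∀ {n m : Nat}, 1 ≤ m → m < n → to05 m < to05 n := by
  intro n
  induction n using Nat.strong_induction_on with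
  | _ n ih =>
    intro m h1 h
    have hm := to05_succ (n := m) (by omega)
    have hn := to05_succ (n := n) (by omega)
    rcases Nat.lt_or_ge (m / 2) (n / 2) with hlt | hge
    · have hb5 : 5 ≤ to05 (n / 2) := to05_ge_five (by omega)
      by_cases ha0 : m / 2 = 0
      · have hm1 : m = 1 := by omega
        subst hm1
        rw [hm, hn]
        simp only [to05_zero, ha0]
        omega
      · have hrec := ih (n / 2) (by omega) (show 1 ≤ m / 2 by omega) hlt
        obtain ⟨c, hc⟩ := to05_dvd_five (m / 2)
        obtain ⟨d, hd⟩ := to05_dvd_five (n / 2)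
        rw [hm, hn]; omega
    · have h2 : m / 2 = n / 2 := by omega
      have hpar : m % 2 = 0 ∧ n % 2 = 1 := by omega
      rw [hm, hn, h2]
      omega

theorem to05_le {m n : Nat} (h1 : 1 ≤ m) (h : m ≤ n) : to05 m ≤ to05 n := by
  rcases Nat.lt_or_ge m n with hlt | hge
  · exact le_of_lt (to05_lt h1 hlt)
  · have : m = n := by omega
    subst this; rfl

theorem to05_1024 : to05 1024 = 50000000000 := by
  rw [← to05F_eq 11 1024 (by norm_num)]; decide

theorem to05_big {n : Nat} (h : 1024 ≤ n) (r : Int) (hr : r ≤ 2147483648) : r < to05 n := by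
  have := to05_le (m := 1024) (by omega) h
  rw [to05_1024] at this
  omega

theorem to05_small {n : Nat} (r : Int) (hr : r ≤ 2147483648) (_h1 : 1 ≤ n) (h : to05 n ≤ r) : n ≤ 1023 := by
  by_contra hc
  have := to05_big (n := n) (by omega) r hr
  omega

-- The BFS node with index n (binary digits of n, 1 -> '5', 0 -> '0') parses to to05 n.
set_option maxRecDepth 100000 in
set_option maxHeartbeats 4000000 in
theorem parseF : ∀ n < 2048, 1 ≤ n → PySem.Int.ofChars? (strOfF 12 n) = some (to05F 12 n) := by
  decide

theorem parse_strOf {n : Nat} (h1 : 1 ≤ n) (h : n < 2048) :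
    PySem.Int.ofChars? (strOf n) = some (to05 n) := by
  have := parseF n h h1
  rwa [to05F_eq 12 n (by omega)] at this

theorem strOf_one : strOf 1 = ['5'] := by decide

theorem strOf_child0 {n : Nat} (h1 : 1 ≤ n) (h : n < 2048) : strOf (2 * n) = strOf n ++ ['0'] := by
  show strOfF 12 (2 * n) = strOf n ++ ['0']
  rw [strOfF]
  have h2 : 2 * n / 2 = n := by omega
  have h3 : 2 * n % 2 = 0 := by omega
  simp only [show 2 * n ≠ 0 by omega, if_false, h2, h3]
  rw [strOfF_congr 11 12 n (by omega) (by omega)]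
  rfl

theorem strOf_child1 {n : Nat} (h1 : 1 ≤ n) (h : n < 2048) : strOf (2 * n + 1) = strOf n ++ ['5'] := by
  show strOfF 12 (2 * n + 1) = strOf n ++ ['5']
  rw [strOfF]
  have h2 : (2 * n + 1) / 2 = n := by omega
  have h3 : (2 * n + 1) % 2 = 1 := by omega
  simp only [show 2 * n + 1 ≠ 0 by omega, if_false, h2, h3]
  rw [strOfF_congr 11 12 n (by omega) (by omega)]
  rfl

-- Descendant relation of the BFS tree on node indices.
inductive Desc : Nat → Nat → Prop
  | refl (n : Nat) : Desc n n
  | left {n k : Nat} : Desc (2 * n) k → Desc n k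
  | right {n k : Nat} : Desc (2 * n + 1) k → Desc n k

theorem Desc.trans {a b c : Nat} (h1 : Desc a b) (h2 : Desc b c) : Desc a c := by
  induction h1 with
  | refl => exact h2
  | left _ ih => exact Desc.left (ih h2)
  | right _ ih => exact Desc.right (ih h2)

theorem Desc.ge {n k : Nat} (h1 : 1 ≤ n) (h : Desc n k) : n ≤ k := by
  induction h with
  | refl => omega
  | left _ ih => have := ih (by omega); omega
  | right _ ih => have := ih (by omega); omega

theorem Desc.one {k : Nat} (h : 1 ≤ k) : Desc 1 k := by
  induction k using Nat.strong_induction_on with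
  | _ k ih =>
    rcases Nat.lt_or_ge k 2 with h2 | h2
    · have : k = 1 := by omega
      subst this; exact Desc.refl 1
    · have hk : Desc 1 (k / 2) := ih (k / 2) (by omega) (by omega)
      have : Desc (k / 2) k := by
        rcases Nat.even_or_odd k with ⟨c, hc⟩ | ⟨c, hc⟩
        · have : k / 2 = c := by omega
          rw [this]; exact Desc.left (by rw [show 2 * c = k by omega]; exact Desc.refl k)
        · have : k / 2 = c := by omega
          rw [this]; exact Desc.right (by rw [show 2 * c + 1 = k by omega]; exact Desc.refl k)
      exact hk.trans this

theorem Desc.inv {n k : Nat} (h : Desc n k) : k = n ∨ Desc (2 * n) k ∨ Desc (2 * n + 1) k := by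
  cases h with
  | refl => exact Or.inl rfl
  | left h => exact Or.inr (Or.inl h)
  | right h => exact Or.inr (Or.inr h)

theorem to05_desc {n k : Nat} (h : Desc n k) : to05 n ≤ to05 k := by
  induction h with
  | refl => exact le_refl _
  | @left n k _ ih =>
    have h1 := to05_nonneg n
    have h2 : to05 (2 * n) = 10 * to05 n := to05_even n
    omega
  | @right n k _ ih =>
    have h1 := to05_nonneg n
    have h2 : to05 (2 * n + 1) = 10 * to05 n + 5 := to05_odd n
    omega

-- Number of BFS pops in the subtree rooted at node n (the guard n ≤ 1023 bounds the measure;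
-- on the stated domain it is implied by to05 n ≤ r).
def cost (r : Int) (n : Nat) : Nat :=
  if 1 ≤ n ∧ n ≤ 1023 ∧ to05 n ≤ r then 1 + cost r (2 * n) + cost r (2 * n + 1) else 1
  termination_by 2048 - n
  decreasing_by all_goals omega

theorem cost_pos (r : Int) (n : Nat) : 1 ≤ cost r n := by
  rw [cost]; split <;> omega

theorem cost_le (r : Int) : ∀ (k n : Nat), 2048 - n ≤ k → 1 ≤ n → n ≤ 2047 → cost r n ≤ 2 * (2048 / n) - 1 := by
  intro k
  induction k with
  | zero => intro n h h1 h2; omega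
  | succ k ih =>
    intro n h h1 h2
    have hq : 1 ≤ 2048 / n := (Nat.one_le_div_iff (by omega)).mpr (by omega)
    rw [cost]
    split
    · rename_i hg
      have c1 := ih (2 * n) (by omega) (by omega) (by omega)
      have c2 := ih (2 * n + 1) (by omega) (by omega) (by omega)
      have e1 : 2048 / (2 * n) = 1024 / n := by
        rw [← Nat.div_div_eq_div_mul]
      have e2 : 2048 / (2 * n + 1) ≤ 1024 / n := by
        calc 2048 / (2 * n + 1) ≤ 2048 / (2 * n) := Nat.div_le_div_left (by omega) (by omega)
        _ = 1024 / n := e1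
      have e3 : 2 * (1024 / n) ≤ 2048 / n := by
        have := Nat.mul_div_le_mul_div_assoc 2 1024 n
        norm_num at this
        exact this
      have hq2 : 1 ≤ 1024 / n := (Nat.one_le_div_iff (by omega)).mpr (by omega)
      omega
    · omega

-- A's BFS, characterised: with enough fuel, the final set's members are the in-range
-- descendants of the queue's nodes.
theorem loopA_mem (l r : Int) (hr : r ≤ 2147483648) :
    ∀ (fuel : Nat) (ns : List Nat) (S : PySem.Set Int) (x : Int),
    (∀ n ∈ ns, 1 ≤ n ∧ n ≤ 2047) → ((ns.map (cost r)).sum ≤ fuel) →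
    (x ∈ loopA l r fuel (ns.map strOf) S ↔
      x ∈ S ∨ ∃ n ∈ ns, ∃ k, Desc n k ∧ x = to05 k ∧ l ≤ x ∧ x ≤ r) := by
  intro fuel
  induction fuel with
  | zero =>
    intro ns S x hb hf
    cases ns with
    | nil => simp [loopA]
    | cons n rest =>
      exfalso
      simp only [List.map_cons, List.sum_cons] at hf
      have := cost_pos r n
      omega
  | succ f ih =>
    intro ns S x hb hf
    cases ns with
    | nil => simp [loopA]
    | cons n rest =>
      obtain ⟨hn1, hn2⟩ := hb n (by simp)
      have hparse : PySem.Int.ofChars? (strOf n) = some (to05 n) := parse_strOf hn1 (by omega)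
      simp only [List.map_cons, loopA, hparse, Option.getD_some]
      have hSmem : ∀ (hc : Prop) [Decidable hc], x ∈ (if hc then PySem.Set.add S (to05 n) else S) ↔
          x ∈ S ∨ (x = to05 n ∧ hc) := by
        intro hc _
        split
        · rw [PySem.Set.mem_add]; rename_i hyes; tauto
        · rename_i hno; tauto
      by_cases hle : to05 n ≤ r
      · have hn1023 : n ≤ 1023 := to05_small r hr hn1 hle
        rw [if_pos hle]
        rw [show strOf n ++ ['0'] = strOf (2*n) from (strOf_child0 hn1 (by omega)).symm,
            show strOf n ++ ['5'] = strOf (2*n+1) from (strOf_child1 hn1 (by omega)).symm,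
            show List.map strOf rest ++ [strOf (2*n), strOf (2*n+1)]
               = (rest ++ [2*n, 2*n+1]).map strOf by simp]
        rw [ih (rest ++ [2*n, 2*n+1]) _ x
          (by
            intro m hm
            rcases List.mem_append.mp hm with hm | hm
            · exact hb m (by simp [hm])
            · simp at hm; omega)
          (by
            simp only [List.map_cons, List.sum_cons] at hf
            rw [cost, if_pos ⟨hn1, hn1023, hle⟩] at hf
            simp [List.map_append]
            omega)]
        rw [hSmem]
        have hinv : ∀ k, Desc n k ↔ k = n ∨ Desc (2*n) k ∨ Desc (2*n+1) k := by
          intro k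
          constructor
          · exact Desc.inv
          · rintro (rfl | h | h)
            · exact Desc.refl k
            · exact Desc.left h
            · exact Desc.right h
        constructor
        · rintro ((hx | ⟨hx1, hx2, hx3⟩) | ⟨m, hm, k, hdk, hxk⟩)
          · exact Or.inl hx
          · exact Or.inr ⟨n, by simp, n, Desc.refl n, hx1, hx1 ▸ hx2, hx1 ▸ hx3⟩
          · rcases List.mem_append.mp hm with hm | hm
            · exact Or.inr ⟨m, by simp [hm], k, hdk, hxk⟩
            · simp only [List.mem_cons, List.not_mem_nil, or_false] at hm
              rcases hm with rfl | rfl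
              · exact Or.inr ⟨n, by simp, k, (hinv k).mpr (Or.inr (Or.inl hdk)), hxk⟩
              · exact Or.inr ⟨n, by simp, k, (hinv k).mpr (Or.inr (Or.inr hdk)), hxk⟩
        · rintro (hx | ⟨m, hm, k, hdk, hx1, hx2, hx3⟩)
          · exact Or.inl (Or.inl hx)
          · rcases List.mem_cons.mp hm with hmn | hm
            · subst hmn
              rcases (hinv k).mp hdk with hkn | hk2 | hk2
              · subst hkn
                exact Or.inl (Or.inr ⟨hx1, hx1 ▸ hx2, hx1 ▸ hx3⟩)
              · exact Or.inr ⟨2*m, List.mem_append.mpr (Or.inr (by simp)), k, hk2, hx1, hx2, hx3⟩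
              · exact Or.inr ⟨2*m+1, List.mem_append.mpr (Or.inr (by simp)), k, hk2, hx1, hx2, hx3⟩
            · exact Or.inr ⟨m, List.mem_append.mpr (Or.inl hm), k, hdk, hx1, hx2, hx3⟩
      · rw [if_neg hle]
        have hS' : (if l ≤ to05 n ∧ to05 n ≤ r then PySem.Set.add S (to05 n) else S) = S := by
          rw [if_neg]; rintro ⟨_, h2⟩; exact hle h2
        rw [hS']
        rw [ih rest S x (fun m hm => hb m (by simp [hm]))
          (by
            simp only [List.map_cons, List.sum_cons] at hf
            have := cost_pos r n
            omega)]
        constructor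
        · rintro (hx | ⟨m, hm, hk⟩)
          · exact Or.inl hx
          · exact Or.inr ⟨m, by simp [hm], hk⟩
        · rintro (hx | ⟨m, hm, k, hk, rfl, h1, h2⟩)
          · exact Or.inl hx
          · rcases List.mem_cons.mp hm with rfl | hm
            · exfalso
              have := to05_desc hk
              omega
            · exact Or.inr ⟨m, hm, k, hk, rfl, h1, h2⟩

theorem loopA_nodup (l r : Int) :
    ∀ (fuel : Nat) (q : List (List Char)) (S : PySem.Set Int), S.Nodup → (loopA l r fuel q S).Nodup := by
  intro fuel
  induction fuel with
  | zero => intro q S h; cases q <;> simp [loopA, h]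
  | succ f ih =>
    intro q S h
    cases q with
    | nil => simpa [loopA]
    | cons c rest =>
      simp only [loopA]
      have hS' : (if l ≤ (PySem.Int.ofChars? c).getD 0 ∧ (PySem.Int.ofChars? c).getD 0 ≤ r
          then PySem.Set.add S ((PySem.Int.ofChars? c).getD 0) else S).Nodup := by
        split
        · exact PySem.Set.nodup_add _ _ h
        · exact h
      split
      · exact ih _ _ hS'
      · exact ih _ _ hS'

-- B's loop, characterised.
theorem loopB_acc (l r : Int) :
    ∀ (f n : Nat) (res : List Int), loopB l r f n res = res ++ loopB l r f n [] := by
  intro f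
  induction f with
  | zero => intro n res; simp [loopB]
  | succ f ih =>
    intro n res
    rw [loopB, loopB]
    by_cases h : r < to05 n
    · simp [h]
    · simp only [h, if_false]
      rw [ih (n+1) (if l ≤ to05 n then res ++ [to05 n] else res),
          ih (n+1) (if l ≤ to05 n then [] ++ [to05 n] else [])]
      split_ifs with h2 <;> simp

theorem loopB_mem (l r : Int) (hr : r ≤ 2147483648) :
    ∀ (f n : Nat) (x : Int), 1 ≤ n → 1024 ≤ n + f →
    (x ∈ loopB l r f n [] ↔ ∃ k, n ≤ k ∧ x = to05 k ∧ l ≤ x ∧ x ≤ r) := by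
  intro f
  induction f with
  | zero =>
    intro n x h1 h2
    simp only [loopB, List.not_mem_nil, false_iff]
    rintro ⟨k, hk, rfl, _, hx2⟩
    exact absurd hx2 (not_le.mpr (to05_big (by omega) r hr))
  | succ f ih =>
    intro n x h1 h2
    rw [loopB]
    by_cases hc : r < to05 n
    · simp only [if_pos hc, List.not_mem_nil, false_iff]
      rintro ⟨k, hk, rfl, _, hx2⟩
      exact absurd hx2 (not_le.mpr (lt_of_lt_of_le hc (to05_le h1 hk)))
    · simp only [if_neg hc]
      rw [loopB_acc, List.mem_append, ih (n+1) x (by omega) (by omega)]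
      by_cases hl2 : l ≤ to05 n
      · simp only [if_pos hl2, List.nil_append, List.mem_singleton]
        constructor
        · rintro (rfl | ⟨k, hk, hx⟩)
          · exact ⟨n, le_refl n, rfl, hl2, not_lt.mp hc⟩
          · exact ⟨k, by omega, hx⟩
        · rintro ⟨k, hk, rfl, hx⟩
          rcases Nat.eq_or_lt_of_le hk with rfl | hk2
          · exact Or.inl rfl
          · exact Or.inr ⟨k, by omega, rfl, hx⟩
      · simp only [if_neg hl2, List.not_mem_nil, false_or]
        constructor
        · rintro ⟨k, hk, hx⟩
          exact ⟨k, by omega, hx⟩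
        · rintro ⟨k, hk, rfl, hx⟩
          rcases Nat.eq_or_lt_of_le hk with rfl | hk2
          · exact absurd hx.1 hl2
          · exact ⟨k, by omega, rfl, hx⟩

theorem loopB_pairwise (l r : Int) (hr : r ≤ 2147483648) :
    ∀ (f n : Nat), 1 ≤ n → 1024 ≤ n + f → (loopB l r f n []).Pairwise (· < ·) := by
  intro f
  induction f with
  | zero => intro n _ _; simp [loopB]
  | succ f ih =>
    intro n h1 h2
    rw [loopB]
    by_cases hc : r < to05 n
    · simp [hc]
    · simp only [if_neg hc]
      rw [loopB_acc]
      have htail := ih (n+1) (by omega) (by omega)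
      by_cases hl2 : l ≤ to05 n
      · simp only [if_pos hl2, List.nil_append, List.singleton_append, List.pairwise_cons]
        refine ⟨fun y hy => ?_, htail⟩
        rcases (loopB_mem l r hr f (n+1) y (by omega) (by omega)).mp hy with ⟨k, hk, rfl, _⟩
        exact to05_lt h1 (by omega)
      · simpa [hl2] using htail

-- ===== VERDICT (by name: the statement is the Claim_ definition above) =====
theorem generate_valid_numbers_spec : Claim_equal_generate_valid_numbers := by
  unfold Claim_equal_generate_valid_numbers Spec_generate_valid_numbers
  intro l r hdom
  have hr : r ≤ 2147483648 := by
    simp only [Dom_generate_valid_numbers, pvDomInt, Bool.and_eq_true, decide_eq_true_eq] at hdom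
    exact hdom.2.2
  unfold generate_valid_numbers generate_valid_numbers_alt
  have hBpw : (loopB l r 4096 1 []).Pairwise (· < ·) :=
    loopB_pairwise l r hr 4096 1 (by omega) (by omega)
  apply PySem.List.sorted_eq_of_perm_of_pairwise_lt
  · rw [List.perm_ext_iff_of_nodup hBpw.nodup
      (loopA_nodup l r 4096 [['5']] PySem.Set.empty (by simp [PySem.Set.empty]))]
    intro a
    rw [loopB_mem l r hr 4096 1 a (by omega) (by omega)]
    have hA := loopA_mem l r hr 4096 [1] PySem.Set.empty a (by simp)
      (by
        have := cost_le r 2048 1 (by omega) (by omega) (by omega)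
        simp only [List.map_cons, List.map_nil, List.sum_cons, List.sum_nil]
        omega)
    rw [show ([1] : List Nat).map strOf = [['5']] by simp [strOf_one]] at hA
    rw [hA]
    simp only [List.mem_singleton, exists_eq_left, show (a ∈ PySem.Set.empty) = (a ∈ ([] : List Int)) from rfl,
      List.not_mem_nil, false_or]
    constructor
    · rintro ⟨k, hk, hx⟩
      exact ⟨k, Desc.one hk, hx⟩
    · rintro ⟨k, hk, hx⟩
      exact ⟨k, Desc.ge (by omega) hk, hx⟩
  · simpa using hBpw
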